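-- pv_equiv track=rewrite | github.com/arnour/PAA-2926-2019 | paa191t1/bottles/binary_search.py | get_before_bit
-- ===== SOURCE A (Python) =====
-- def get_before_bit(bit_array):
--     if bit_array[-1] == True:
--         bit_array[-1] = False
--     else:
--         bit_array.reverse()
--         index = bit_array.index(True)
--         for i in range(index):
--             bit_array[i] = True
--         bit_array[index] = False
--         bit_array.reverse()
--     return bit_array
-- ===== SOURCE B (Python) =====
-- def get_before_bit(bit_array):
--     # Arithmetic reimplementation: read the bits as a base-2 numeral, subtract
--     # one as an integer, and format the result back at the same width.
--     n = int("".join("1" if b == True else "0" for b in bit_array), 2)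
--     if n == 0:
--         raise ValueError("cannot decrement zero")
--     s = format(n - 1, "b").rjust(len(bit_array), "0")
--     bit_array[:] = [c == "1" for c in s]
--     return bit_array
-- ===== Notes on version B (the rewrite author's own statement) =====
-- stated objective: alternative
-- what changed: Replaced A's in-place bit-borrow manipulation (reverse, index(True), flip loop, reverse) by integer arithmetic: read the bits as a base-2 numeral with int(.,2), subtract one, and format the number back at the same width.
-- outside the precondition, e.g. on get_before_bit([]): A raises IndexError, B raises ValueError; on get_before_bit([False, False]): A raises ValueError, B raises ValueError
import Mathlib
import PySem

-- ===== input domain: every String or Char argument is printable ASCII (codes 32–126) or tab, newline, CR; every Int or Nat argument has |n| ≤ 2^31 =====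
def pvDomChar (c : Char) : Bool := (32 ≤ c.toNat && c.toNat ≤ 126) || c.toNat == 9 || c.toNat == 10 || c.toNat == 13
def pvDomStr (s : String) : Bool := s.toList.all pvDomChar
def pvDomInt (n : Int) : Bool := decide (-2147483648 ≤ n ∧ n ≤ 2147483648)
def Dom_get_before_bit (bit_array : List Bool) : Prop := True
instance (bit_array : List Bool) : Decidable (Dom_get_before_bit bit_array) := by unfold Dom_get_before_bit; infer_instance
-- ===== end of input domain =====

-- B replaces A's in-place bit-borrow manipulation by integer arithmetic (fold to a number,
-- subtract one, re-expand at the same width); equivalence is about the RETURN value only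
-- (both Pythons mutate bit_array in place to the same final content).

-- ===== PORT A =====
def get_before_bit (bit_array : List Bool) : List Bool :=
  if PySem.List.pyGet? bit_array (-1) = some true then
    bit_array.set (bit_array.length - 1) false
  else
    match PySem.List.index? bit_array.reverse true with
    | none => []   -- ValueError (all-zeros / empty input); excluded by Pre_
    | some idx =>
        ((((PySem.List.pyRange 0 (idx : Int) 1).foldl
            (fun acc i => acc.set i.toNat true) bit_array.reverse).set idx false)).reverse

-- ===== PORT B =====
-- format(n, "b"): binary digits of n, MSB first, no leading zeros (exact for Nat)
def natToBin (n : Nat) : List Char :=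
  if n < 2 then [if n = 1 then '1' else '0']
  else natToBin (n / 2) ++ [if n % 2 = 1 then '1' else '0']
decreasing_by omega

def get_before_bit_alt (bit_array : List Bool) : List Bool :=
  let cs := bit_array.map (fun b => if b = true then '1' else '0')   -- the join
  if cs.length = 0 then []   -- int("", 2) raises ValueError; excluded by Pre_
  else
    -- int(s, 2), exact here since cs holds only '0'/'1'
    let n := cs.foldl (fun acc c => acc * 2 + (if c = '1' then 1 else 0)) 0
    if n = 0 then []   -- ValueError; excluded by Pre_
    else
      let s := natToBin (n - 1)
      let p := List.replicate (bit_array.length - s.length) '0' ++ s   -- rjust(len, "0")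
      p.map (fun c => decide (c = '1'))

-- ===== PRECONDITION & SPEC =====
-- Python A raises IndexError on [] and ValueError when no True is present; B raises there too.
def Pre_get_before_bit (bit_array : List Bool) : Prop := true ∈ bit_array
instance (bit_array : List Bool) : Decidable (Pre_get_before_bit bit_array) := by
  unfold Pre_get_before_bit; infer_instance
def pvWitness_get_before_bit : List Bool := [true]

def Spec_get_before_bit (bit_array : List Bool) (out : List Bool) : Prop := out = get_before_bit_alt bit_array
instance (bit_array : List Bool) (out : List Bool) : Decidable (Spec_get_before_bit bit_array out) := by unfold Spec_get_before_bit; infer_instance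

-- ===== CLAIM (what is proved, stated in full; the proofs are below) =====
def Claim_equal_get_before_bit : Prop := ∀ (bit_array : List Bool), Dom_get_before_bit bit_array → Pre_get_before_bit bit_array → Spec_get_before_bit bit_array (get_before_bit bit_array)

-- ===== LEMMAS AND PROOFS =====

-- canonical "borrow" on the reversed list: flip leading Falses to True, first True to False
def hdec : List Bool → Option (List Bool)
  | [] => none
  | b :: r => if b then some (false :: r) else (hdec r).map (true :: ·)

theorem hdec_false_prefix (suf : List Bool) (pre : List Bool) (h : true ∉ pre) :
    hdec (pre ++ true :: suf) = some (List.replicate pre.length true ++ false :: suf) := by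
  induction pre with
  | nil => simp [hdec]
  | cons c t ih =>
      cases c with
      | true => exact absurd (List.mem_cons_self) h
      | false =>
          simp only [List.cons_append, hdec, if_neg Bool.false_ne_true,
            ih (fun hm => h (List.mem_cons_of_mem _ hm))]
          simp [List.replicate_succ]

theorem foldl_set_range (k : Nat) (r : List Bool) (hk : k ≤ r.length) :
    (PySem.List.pyRange 0 (k : Int) 1).foldl (fun acc i => acc.set i.toNat true) r
      = List.replicate k true ++ r.drop k := by
  induction k with
  | zero => simp
  | succ n ih =>
      have hn : n ≤ r.length := Nat.le_of_succ_le hk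
      have hlt : n < r.length := hk
      rw [show ((n + 1 : Nat) : Int) = (n : Int) + 1 by push_cast; ring,
        PySem.List.pyRange_one_succ_right (by omega), List.foldl_append, ih hn]
      simp only [List.foldl_cons, List.foldl_nil, Int.toNat_natCast]
      rw [List.drop_eq_getElem_cons hlt,
        List.set_append_right n true (by simp)]
      simp only [List.length_replicate, Nat.sub_self, List.set_cons_zero,
        List.replicate_succ', List.append_assoc, List.singleton_append]

-- A's result, characterised through hdec on the reversed list
theorem getA_eq (l : List Bool) (h : true ∈ l) :
    get_before_bit l = ((hdec l.reverse).map List.reverse).getD [] := by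
  have hne : l ≠ [] := List.ne_nil_of_mem h
  unfold get_before_bit
  by_cases hlast : PySem.List.pyGet? l (-1) = some true
  · rw [if_pos hlast]
    rw [PySem.List.pyGet?_neg_one] at hlast
    rcases l.eq_nil_or_concat with rfl | ⟨ys, c, rfl⟩
    · exact absurd rfl hne
    · rw [List.concat_eq_append] at *
      rw [List.getLast?_concat] at hlast
      obtain rfl : c = true := by simpa using hlast
      rw [List.reverse_append]
      simp only [List.reverse_singleton, List.singleton_append, hdec]
      rw [List.length_append, List.set_append_right _ _ (by simp)]
      simp
  · rw [if_neg hlast]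
    have hmem : true ∈ l.reverse := by simpa using h
    cases hk : PySem.List.index? l.reverse true with
    | none =>
        rw [PySem.List.index?_eq_none_iff] at hk
        exact absurd hmem hk
    | some k =>
        dsimp only
        obtain ⟨pre, suf, hsplit, hlen, hnp⟩ := (PySem.List.index?_eq_some_iff _ _ _).mp hk
        rw [hsplit, hdec_false_prefix suf pre hnp]
        have hkle : k ≤ (pre ++ true :: suf).length := by
          rw [List.length_append]; omega
        rw [foldl_set_range k _ hkle]
        have hdrop : (pre ++ true :: suf).drop k = true :: suf := by
          rw [← hlen, List.drop_left]
        rw [hdrop, ← hlen, List.set_append_right _ _ (by simp)]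
        simp

-- the MSB-first value of a bit list, exactly the port's fold
def bval (l : List Bool) : Nat :=
  l.foldl (fun n b => n * 2 + (if b = true then 1 else 0)) 0

theorem bval_foldl (l : List Bool) : ∀ s : Nat,
    l.foldl (fun n b => n * 2 + (if b = true then 1 else 0)) s = s * 2 ^ l.length + bval l := by
  induction l with
  | nil => intro s; simp [bval]
  | cons b t ih =>
      intro s
      have hb : bval (b :: t) = (if b = true then 1 else 0) * 2 ^ t.length + bval t := by
        show List.foldl _ (0 * 2 + if b = true then 1 else 0) t = _
        rw [ih]; ring_nf
      simp only [List.foldl_cons, ih, hb, List.length_cons, pow_succ]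
      ring

theorem bval_cons (b : Bool) (t : List Bool) :
    bval (b :: t) = (if b = true then 1 else 0) * 2 ^ t.length + bval t := by
  show List.foldl _ (0 * 2 + if b = true then 1 else 0) t = _
  rw [bval_foldl]; ring_nf

theorem bval_append (xs ys : List Bool) :
    bval (xs ++ ys) = bval xs * 2 ^ ys.length + bval ys := by
  simp only [bval, List.foldl_append]
  exact bval_foldl ys _

theorem bval_replicate_false (k : Nat) : bval (List.replicate k false) = 0 := by
  induction k with
  | zero => simp [bval]
  | succ n ih => rw [List.replicate_succ, bval_cons, ih]; simp

theorem bval_replicate_true (k : Nat) : bval (List.replicate k true) = 2 ^ k - 1 := by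
  induction k with
  | zero => simp [bval]
  | succ n ih =>
      have h1 : (1 : Nat) ≤ 2 ^ n := Nat.one_le_two_pow
      rw [List.replicate_succ, bval_cons, ih]
      simp only [List.length_replicate, pow_succ, if_true]
      omega

-- LSB-first expansion (proof-only; used to show bval is injective at fixed length)
def lsb : Nat → Nat → List Bool
  | 0, _ => []
  | w + 1, n => decide (n % 2 = 1) :: lsb w (n / 2)

-- expansion inverts the fold, at the list's own width (no bound needed)
theorem lsb_bval (m : List Bool) : lsb m.length (bval m) = m.reverse := by
  induction m using List.reverseRecOn with
  | nil => simp [lsb, bval]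
  | append_singleton ys b ih =>
      have hlen : (ys ++ [b]).length = ys.length + 1 := by simp
      cases b with
      | false =>
          have hv : bval (ys ++ [false]) = bval ys * 2 := by
            rw [bval_append]; simp [bval]
          rw [hlen, hv]
          simp only [lsb]
          rw [show bval ys * 2 % 2 = 0 from by omega,
            show bval ys * 2 / 2 = bval ys from by omega, ih]
          simp
      | true =>
          have hv : bval (ys ++ [true]) = bval ys * 2 + 1 := by
            rw [bval_append]; simp [bval]
          rw [hlen, hv]
          simp only [lsb]
          rw [show (bval ys * 2 + 1) % 2 = 1 from by omega,
            show (bval ys * 2 + 1) / 2 = bval ys from by omega, ih]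
          simp

theorem bval_inj (m₁ m₂ : List Bool) (hl : m₁.length = m₂.length) (hv : bval m₁ = bval m₂) :
    m₁ = m₂ := by
  have h1 := lsb_bval m₁
  have h2 := lsb_bval m₂
  rw [hl, hv, h2] at h1
  exact (List.reverse_injective h1).symm

theorem bval_lt (m : List Bool) : bval m < 2 ^ m.length := by
  induction m with
  | nil => simp [bval]
  | cons b t ih =>
      rw [bval_cons]
      have hp : (2 : Nat) ^ (b :: t).length = 2 * 2 ^ t.length := by
        rw [List.length_cons, pow_succ]; ring
      rw [List.length_cons] at *
      cases b <;> simp <;> omega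

theorem parse_map (m : List Bool) :
    (m.map (fun b => if b = true then '1' else '0')).foldl
      (fun acc c => acc * 2 + (if c = '1' then 1 else 0)) 0 = bval m := by
  rw [List.foldl_map]
  unfold bval
  congr 1
  funext acc b
  cases b <;> simp

theorem bval_natToBin (v : Nat) :
    bval ((natToBin v).map (fun c => decide (c = '1'))) = v := by
  induction v using Nat.strong_induction_on with
  | _ v ih =>
      rw [natToBin]
      by_cases h : v < 2
      · rw [if_pos h]
        have : v = 0 ∨ v = 1 := by omega
        rcases this with rfl | rfl <;> decide
      · rw [if_neg h, List.map_append, bval_append, ih (v / 2) (by omega)]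
        by_cases hm : v % 2 = 1
        · rw [if_pos hm]
          have hc : bval (List.map (fun c => decide (c = '1')) ['1']) = 1 := by decide
          rw [hc]
          simp only [List.length_map, List.length_cons, List.length_nil]
          omega
        · rw [if_neg hm]
          have hc : bval (List.map (fun c => decide (c = '1')) ['0']) = 0 := by decide
          rw [hc]
          simp only [List.length_map, List.length_cons, List.length_nil]
          omega

theorem natToBin_len (v : Nat) : ∀ L, 1 ≤ L → v < 2 ^ L → (natToBin v).length ≤ L := by
  induction v using Nat.strong_induction_on with
  | _ v ih =>
      intro L h1 h2
      rw [natToBin]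
      by_cases h : v < 2
      · rw [if_pos h]
        simpa using h1
      · rw [if_neg h]
        have hL2 : 2 ≤ L := by
          by_contra hc
          have hL1 : L = 1 := by omega
          subst hL1
          have : (2 : Nat) ^ 1 = 2 := rfl
          omega
        obtain ⟨M, rfl⟩ : ∃ M, L = M + 1 := ⟨L - 1, by omega⟩
        have hsplit : (2 : Nat) ^ (M + 1) = 2 * 2 ^ M := by rw [pow_succ]; ring
        have hrec := ih (v / 2) (by omega) M (by omega) (by omega)
        simp only [List.length_append, List.length_cons, List.length_nil]
        omega

-- B's port, characterised through bval and natToBin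
theorem alt_eq (m : List Bool) (hne : m ≠ []) (h0 : bval m ≠ 0) :
    get_before_bit_alt m
      = List.replicate (m.length - (natToBin (bval m - 1)).length) false
        ++ (natToBin (bval m - 1)).map (fun c => decide (c = '1')) := by
  simp only [get_before_bit_alt]
  rw [parse_map]
  rw [if_neg (by simpa using hne), if_neg h0]
  rw [List.map_append, List.map_replicate]
  simp

-- last-True decomposition of a list containing true
theorem last_true_split (l : List Bool) (h : true ∈ l) :
    ∃ a k, l = a ++ true :: List.replicate k false := by
  have hmem : true ∈ l.reverse := by simpa using h
  cases hk : PySem.List.index? l.reverse true with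
  | none =>
      rw [PySem.List.index?_eq_none_iff] at hk
      exact absurd hmem hk
  | some k =>
      obtain ⟨pre, suf, hsplit, hlen, hnp⟩ := (PySem.List.index?_eq_some_iff _ _ _).mp hk
      refine ⟨suf.reverse, pre.length, ?_⟩
      have hpre : pre.reverse = List.replicate pre.length false := by
        rw [List.eq_replicate_iff]
        refine ⟨by simp, fun b hb => ?_⟩
        rw [List.mem_reverse] at hb
        cases b with
        | true => exact absurd hb hnp
        | false => rfl
      have := congrArg List.reverse hsplit
      rw [List.reverse_reverse] at this
      rw [this]
      simp [hpre]

-- ===== VERDICT (by name: the statement is the Claim_ definition above) =====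
theorem get_before_bit_spec : Claim_equal_get_before_bit := by
  intro l _ hpre
  unfold Spec_get_before_bit
  obtain ⟨a, k, rfl⟩ := last_true_split l hpre
  -- A's value: a ++ false :: replicate k true
  have hA : get_before_bit (a ++ true :: List.replicate k false)
      = a ++ false :: List.replicate k true := by
    rw [getA_eq _ hpre, List.reverse_append, List.reverse_cons, List.reverse_replicate,
      List.append_assoc, List.singleton_append,
      hdec_false_prefix a.reverse (List.replicate k false) (by simp)]
    simp
  have h1 : (1 : Nat) ≤ 2 ^ k := Nat.one_le_two_pow
  have hx : bval (true :: List.replicate k false) = 2 ^ k := by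
    rw [bval_cons, bval_replicate_false]; simp
  have hy : bval (false :: List.replicate k true) = 2 ^ k - 1 := by
    rw [bval_cons, bval_replicate_true]; simp
  have hvl : bval (a ++ true :: List.replicate k false) = bval a * 2 ^ (k + 1) + 2 ^ k := by
    rw [bval_append, hx]; simp
  have hvr : bval (a ++ false :: List.replicate k true) = bval a * 2 ^ (k + 1) + (2 ^ k - 1) := by
    rw [bval_append, hy]; simp
  have hdecr : bval (a ++ true :: List.replicate k false) - 1
      = bval (a ++ false :: List.replicate k true) := by rw [hvl, hvr]; omega
  have hne0 : bval (a ++ true :: List.replicate k false) ≠ 0 := by rw [hvl]; omega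
  have hlen2 : (a ++ true :: List.replicate k false).length
      = (a ++ false :: List.replicate k true).length := by simp
  rw [hA, alt_eq _ (by simp) hne0, hdecr]
  -- both sides have the same length and the same bval, hence are equal
  have hbl : (natToBin (bval (a ++ false :: List.replicate k true))).length
      ≤ (a ++ false :: List.replicate k true).length := by
    refine natToBin_len _ _ (by simp; omega) ?_
    exact bval_lt _
  refine (bval_inj _ _ ?_ ?_).symm
  · simp only [List.length_append, List.length_replicate, List.length_map] at *
    omega
  · rw [bval_append, bval_replicate_false, bval_natToBin]
    simp
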